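-- pv_equiv track=rewrite | github.com/Harsheel12/Barcode-Scanner | barcode_scanner.py | computeErosion8Nbh5x5FlatSE
-- ===== SOURCE A (Python) =====
-- def createInitializedGreyscalePixelArray(image_width, image_height, initValue = 0):
--
--     new_array = [[initValue for x in range(image_width)] for y in range(image_height)]
--     return new_array
--
-- def CheckErosion(pixel_array, i, j):
--
--     values = []
--
--     #Scans a 5x5 area around current Pixel
--     for x in range(-2, 3):
--         for y in range(-2, 3):
--             currentValue = pixel_array[(i + x) + 1][(j + y) + 1]
--
--             values.append(currentValue)
--
--
--     if 0 in values:
--         return 0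
--     else:
--         return 1
--
-- def computeErosion8Nbh5x5FlatSE(pixel_array, image_width, image_height):
--
--     #Temporary array with the extra border
--     temp = createInitializedGreyscalePixelArray(image_width+2, image_height+2)
--
--     #Original array with border
--     arrayWithBorder = ZeroBorder(pixel_array, temp, image_width, image_height)
--
--     image = createInitializedGreyscalePixelArray(image_width, image_height)
--
--     for i in range(1, image_height-1):
--         for j in range(1, image_width-1):
--             image[i][j] = CheckErosion(arrayWithBorder, i, j)
--
--     return image
--
-- def ZeroBorder(original, new, image_width, image_height):
--     for row in range(image_height):
--         for col in range(image_width):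
--             new[row + 1][col + 1] = original[row][col]
--
--     return new
-- ===== SOURCE B (Python) =====
-- def computeErosion8Nbh5x5FlatSE(pixel_array, image_width, image_height):
--     # Separable two-pass erosion: horizontal 1x5 pass, then vertical 5x1 pass,
--     # treating out-of-bounds positions as 0 (so borders erode to 0, as in A).
--     hpass = [[0 if any(j + d < 0 or j + d >= image_width or pixel_array[i][j + d] == 0
--                        for d in range(-2, 3)) else 1
--               for j in range(image_width)]
--              for i in range(image_height)]
--     return [[0 if any(i + d < 0 or i + d >= image_height or hpass[i + d][j] == 0
--                       for d in range(-2, 3)) else 1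
--              for j in range(image_width)]
--             for i in range(image_height)]
-- ===== Notes on version B (the rewrite author's own statement) =====
-- stated objective: faster
-- what changed: Replaced the zero-padded border copy plus per-pixel 5x5 scan with a separable two-pass erosion (a 1x5 horizontal pass into an intermediate array, then a 5x1 vertical pass), treating out-of-bounds positions as 0 so borders erode exactly as in A.
import Mathlib
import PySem

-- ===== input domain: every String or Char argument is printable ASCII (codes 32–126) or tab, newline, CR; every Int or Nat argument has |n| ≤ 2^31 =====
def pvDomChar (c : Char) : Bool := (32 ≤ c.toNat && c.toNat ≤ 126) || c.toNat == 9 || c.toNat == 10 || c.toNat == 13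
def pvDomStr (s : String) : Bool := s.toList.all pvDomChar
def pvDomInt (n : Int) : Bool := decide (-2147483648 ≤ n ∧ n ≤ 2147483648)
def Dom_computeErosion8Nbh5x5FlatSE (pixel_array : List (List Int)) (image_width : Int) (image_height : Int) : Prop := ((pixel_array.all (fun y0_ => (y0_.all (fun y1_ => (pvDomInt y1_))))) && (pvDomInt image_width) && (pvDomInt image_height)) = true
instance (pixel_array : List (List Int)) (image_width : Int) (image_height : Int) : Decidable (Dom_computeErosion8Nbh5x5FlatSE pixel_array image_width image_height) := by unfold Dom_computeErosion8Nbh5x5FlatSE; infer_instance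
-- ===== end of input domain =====

-- B replaces A's zero-border copy plus per-pixel 5x5 scan by a separable two-pass (1x5 then 5x1) erosion, reading 10 instead of 25 window positions per pixel.

-- ===== PORT A =====
-- pyGetD is used for the reads; on every input admitted by Pre_ every index read here is in range, so it is exact there.
def pvInit (image_width image_height : Int) (initValue : Int) : List (List Int) :=
  (PySem.List.pyRange 0 image_height 1).map (fun _ =>
    (PySem.List.pyRange 0 image_width 1).map (fun _ => initValue))

def pvCheckErosion (pixel_array : List (List Int)) (i j : Int) : Int :=
  let values : List Int :=
    (PySem.List.pyRange (-2) 3 1).foldl (fun acc x =>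
      (PySem.List.pyRange (-2) 3 1).foldl (fun acc2 y =>
        acc2 ++ [PySem.List.pyGetD (PySem.List.pyGetD pixel_array ((i + x) + 1) []) ((j + y) + 1) 0]) acc) []
  if 0 ∈ values then 0 else 1

def pvZeroBorder (original new : List (List Int)) (image_width image_height : Int) : List (List Int) :=
  (PySem.List.pyRange 0 image_height 1).foldl (fun nw row =>
    (PySem.List.pyRange 0 image_width 1).foldl (fun nw2 col =>
      PySem.List.pySetD nw2 (row + 1)
        (PySem.List.pySetD (PySem.List.pyGetD nw2 (row + 1) []) (col + 1)
          (PySem.List.pyGetD (PySem.List.pyGetD original row []) col 0))) nw) new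

def computeErosion8Nbh5x5FlatSE (pixel_array : List (List Int)) (image_width : Int) (image_height : Int) : List (List Int) :=
  let temp := pvInit (image_width + 2) (image_height + 2) 0
  let arrayWithBorder := pvZeroBorder pixel_array temp image_width image_height
  let image := pvInit image_width image_height 0
  (PySem.List.pyRange 1 (image_height - 1) 1).foldl (fun img i =>
    (PySem.List.pyRange 1 (image_width - 1) 1).foldl (fun img2 j =>
      PySem.List.pySetD img2 i
        (PySem.List.pySetD (PySem.List.pyGetD img2 i []) j (pvCheckErosion arrayWithBorder i j))) img) image

-- ===== PORT B =====
-- horizontal 1x5 pass of Source B; the `decide (…) || …` chain mirrors Source B's `any` with its bound guards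
def pvHPass (pixel_array : List (List Int)) (image_width image_height : Int) : List (List Int) :=
  (PySem.List.pyRange 0 image_height 1).map (fun i =>
    (PySem.List.pyRange 0 image_width 1).map (fun j =>
      if (PySem.List.pyRange (-2) 3 1).any (fun d =>
            decide (j + d < 0) || decide (image_width ≤ j + d) ||
            (PySem.List.pyGetD (PySem.List.pyGetD pixel_array i []) (j + d) 0 == 0))
      then 0 else 1))

def computeErosion8Nbh5x5FlatSE_alt (pixel_array : List (List Int)) (image_width : Int) (image_height : Int) : List (List Int) :=
  let hpass := pvHPass pixel_array image_width image_height
  (PySem.List.pyRange 0 image_height 1).map (fun i =>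
    (PySem.List.pyRange 0 image_width 1).map (fun j =>
      if (PySem.List.pyRange (-2) 3 1).any (fun d =>
            decide (i + d < 0) || decide (image_height ≤ i + d) ||
            (PySem.List.pyGetD (PySem.List.pyGetD hpass (i + d) []) j 0 == 0))
      then 0 else 1))

-- ===== PRECONDITION & SPEC =====
-- Pre_ = exactly the inputs on which the Python A returns: A reads pixel_array[row][col] for all 0 ≤ row < image_height
-- and 0 ≤ col < image_width (and nothing else), so it raises IndexError iff both dimensions are positive and
-- pixel_array (or one of its first image_height rows) is too short.
def Pre_computeErosion8Nbh5x5FlatSE (pixel_array : List (List Int)) (image_width : Int) (image_height : Int) : Prop :=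
  0 < image_height → 0 < image_width →
    (image_height ≤ (pixel_array.length : Int) ∧
     ∀ row ∈ pixel_array.take image_height.toNat, image_width ≤ (row.length : Int))
instance (pixel_array : List (List Int)) (image_width : Int) (image_height : Int) : Decidable (Pre_computeErosion8Nbh5x5FlatSE pixel_array image_width image_height) := by unfold Pre_computeErosion8Nbh5x5FlatSE; infer_instance

def pvWitness_computeErosion8Nbh5x5FlatSE : List (List Int) × Int × Int :=
  ([[1, 1, 1], [1, 1, 1], [1, 1, 1]], 3, 3)

def Spec_computeErosion8Nbh5x5FlatSE (pixel_array : List (List Int)) (image_width : Int) (image_height : Int) (out : List (List Int)) : Prop := out = computeErosion8Nbh5x5FlatSE_alt pixel_array image_width image_height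
instance (pixel_array : List (List Int)) (image_width : Int) (image_height : Int) (out : List (List Int)) : Decidable (Spec_computeErosion8Nbh5x5FlatSE pixel_array image_width image_height out) := by unfold Spec_computeErosion8Nbh5x5FlatSE; infer_instance

-- ===== CLAIM (what is proved, stated in full; the proofs are below) =====
def Claim_equal_computeErosion8Nbh5x5FlatSE : Prop := ∀ (pixel_array : List (List Int)) (image_width : Int) (image_height : Int), Dom_computeErosion8Nbh5x5FlatSE pixel_array image_width image_height → Pre_computeErosion8Nbh5x5FlatSE pixel_array image_width image_height → Spec_computeErosion8Nbh5x5FlatSE pixel_array image_width image_height (computeErosion8Nbh5x5FlatSE pixel_array image_width image_height)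

-- ===== LEMMAS AND PROOFS =====

-- the value both programs see at (r, c): the image extended by 0 outside its h x w box
def pvExt (pa : List (List Int)) (w h r c : Int) : Int :=
  if 0 ≤ r ∧ r < h ∧ 0 ≤ c ∧ c < w then PySem.List.pyGetD (PySem.List.pyGetD pa r []) c 0 else 0

-- "the 5x5 window centred at (i, j) contains a 0 of the extended image"
def pvZwin (pa : List (List Int)) (w h i j : Int) : Bool :=
  (PySem.List.pyRange (-2) 3 1).any (fun d =>
    (PySem.List.pyRange (-2) 3 1).any (fun e => pvExt pa w h (i + d) (j + e) == 0))

-- the common normal form both ports are reduced to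
def pvGrid (pa : List (List Int)) (w h : Int) : List (List Int) :=
  (PySem.List.pyRange 0 h 1).map (fun i =>
    (PySem.List.pyRange 0 w 1).map (fun j => if pvZwin pa w h i j then 0 else 1))

theorem pvPG_const_zero (l : List Int) (h : ∀ x ∈ l, x = 0) (c : Int) :
    PySem.List.pyGetD l c 0 = 0 := by
  by_cases hin : PySem.Raise.InRange l.length c
  · exact h _ (PySem.List.pyGetD_mem l 0 hin)
  · exact PySem.List.pyGetD_of_none l c 0 ((PySem.List.pyGet?_eq_none_iff l c).2 hin)

theorem pvPG_PS {α : Type} (m : List α) (I c : Int) (v : α) (d : α)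
    (hI0 : 0 ≤ I) (hI : I < (m.length : Int)) (hc0 : 0 ≤ c) (hc : c < (m.length : Int)) :
    PySem.List.pyGetD (PySem.List.pySetD m I v) c d = if c = I then v else PySem.List.pyGetD m c d := by
  rw [PySem.List.pySetD_of_nonneg m v hI0]
  rw [PySem.List.pyGetD_eq_getElem _ d hc0 (by simpa using hc)]
  by_cases hcI : c = I
  · subst hcI
    simp [List.getElem_set_self]
  · rw [List.getElem_set_ne (by omega)]
    rw [if_neg hcI, PySem.List.pyGetD_eq_getElem m d hc0 hc]

-- a loop body that writes only into row I commutes with the fold: it is one set of row I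
theorem pvInner2Set {α : Type} (l : List Int) (g : List α → Int → List α) :
    ∀ (m : List (List α)) (I : Int), 0 ≤ I → I < (m.length : Int) →
    l.foldl (fun mm j => PySem.List.pySetD mm I (g (PySem.List.pyGetD mm I []) j)) m =
      PySem.List.pySetD m I (l.foldl g (PySem.List.pyGetD m I [])) := by
  induction l with
  | nil =>
    intro m I hI0 hI
    simp only [List.foldl_nil]
    rw [PySem.List.pySetD_of_nonneg _ _ hI0, PySem.List.pyGetD_eq_getElem _ [] hI0 hI]
    exact (List.set_getElem_self ..).symm
  | cons j l ih =>
    intro m I hI0 hI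
    simp only [List.foldl_cons]
    rw [ih (PySem.List.pySetD m I (g (PySem.List.pyGetD m I []) j)) I hI0
      (by rw [PySem.List.length_pySetD]; exact hI)]
    rw [pvPG_PS m I I _ [] hI0 hI hI0 hI, if_pos rfl]
    rw [PySem.List.pySetD_of_nonneg m _ hI0, PySem.List.pySetD_of_nonneg _ _ hI0,
      PySem.List.pySetD_of_nonneg m _ hI0, List.set_set]

theorem pvSetFoldLen {α : Type} (ix : Int → Int) (v : Int → α) (l : List Int) :
    ∀ (r : List α),
    (l.foldl (fun rr j => PySem.List.pySetD rr (ix j) (v j)) r).length = r.length := by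
  induction l with
  | nil => intro r; rfl
  | cons j l ih => intro r; simp only [List.foldl_cons]; rw [ih, PySem.List.length_pySetD]

theorem pvSetFold {α : Type} (t : Int) (v : Int → α) (d : α) :
    ∀ (n : Nat) (a b : Int) (r : List α), (b - a).toNat = n → 0 ≤ a + t → b + t ≤ (r.length : Int) →
    ∀ (c : Int), 0 ≤ c → c < (r.length : Int) →
    PySem.List.pyGetD ((PySem.List.pyRange a b 1).foldl (fun rr j => PySem.List.pySetD rr (j + t) (v j)) r) c d =
      if a + t ≤ c ∧ c < b + t then v (c - t) else PySem.List.pyGetD r c d := by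
  intro n
  induction n with
  | zero =>
    intro a b r hn _ _ c hc0 hc
    rw [PySem.List.pyRange_one_eq_nil (by omega)]
    rw [if_neg (by omega)]
    rfl
  | succ n ih =>
    intro a b r hn ha hb c hc0 hc
    rw [PySem.List.pyRange_one_cons (by omega)]
    simp only [List.foldl_cons]
    rw [ih (a + 1) b _ (by omega) (by omega)
      (by rw [PySem.List.length_pySetD]; exact hb) c hc0
      (by rw [PySem.List.length_pySetD]; exact_mod_cast hc)]
    rw [pvPG_PS r (a + t) c (v a) d ha (by omega) hc0 hc]
    by_cases h1 : a + 1 + t ≤ c ∧ c < b + t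
    · rw [if_pos h1, if_pos (by omega)]
    · rw [if_neg h1]
      by_cases h2 : c = a + t
      · rw [if_pos h2, if_pos (by omega)]
        subst h2
        congr 1
        omega
      · rw [if_neg h2, if_neg (by omega)]

-- the outer loop: each step i rewrites row i+t as R i applied to the still-initial row z
theorem pvOuterFold {α : Type} (Bo : List (List α) → Int → List (List α))
    (R : Int → List α → List α) (t : Int) (z : List α) (L : Nat) :
    ∀ (n : Nat) (a b : Int) (m : List (List α)), (b - a).toNat = n → m.length = L →
    0 ≤ a + t → b + t ≤ (L : Int) →
    (∀ (mm : List (List α)) (i : Int), a ≤ i → i < b → mm.length = L →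
        Bo mm i = PySem.List.pySetD mm (i + t) (R i (PySem.List.pyGetD mm (i + t) []))) →
    (∀ r : Int, a ≤ r → r < b → PySem.List.pyGetD m (r + t) [] = z) →
    ((PySem.List.pyRange a b 1).foldl Bo m).length = L ∧
    (∀ (c : Int), 0 ≤ c → c < (L : Int) →
      PySem.List.pyGetD ((PySem.List.pyRange a b 1).foldl Bo m) c [] =
        if a + t ≤ c ∧ c < b + t then R (c - t) z else PySem.List.pyGetD m c []) := by
  intro n
  induction n with
  | zero =>
    intro a b m hn hL _ _ _ _
    rw [PySem.List.pyRange_one_eq_nil (by omega)]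
    refine ⟨hL, fun c hc0 hc => ?_⟩
    rw [if_neg (by omega)]
    rfl
  | succ n ih =>
    intro a b m hn hL ha hb hB hz
    rw [PySem.List.pyRange_one_cons (by omega)]
    simp only [List.foldl_cons]
    have hBa := hB m a (le_refl a) (by omega) hL
    have hza := hz a (le_refl a) (by omega)
    have hm'eq : Bo m a = PySem.List.pySetD m (a + t) (R a z) := by rw [hBa, hza]
    have hL' : (Bo m a).length = L := by rw [hm'eq, PySem.List.length_pySetD, hL]
    have hstep := ih (a + 1) b (Bo m a) (by omega) hL' (by omega) hb
      (fun mm i hi1 hi2 hmm => hB mm i (by omega) hi2 hmm)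
      (fun r hr1 hr2 => by
        rw [hm'eq, pvPG_PS m (a + t) (r + t) (R a z) [] ha (by omega) (by omega) (by omega)]
        rw [if_neg (by omega)]
        exact hz r (by omega) hr2)
    refine ⟨hstep.1, fun c hc0 hc => ?_⟩
    rw [hstep.2 c hc0 hc]
    by_cases h1 : a + 1 + t ≤ c ∧ c < b + t
    · rw [if_pos h1, if_pos (by omega)]
    · rw [if_neg h1]
      rw [hm'eq, pvPG_PS m (a + t) c (R a z) [] ha (by omega) hc0 (by omega)]
      by_cases h2 : c = a + t
      · rw [if_pos h2, if_pos (by omega)]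
        subst h2
        congr 1
        omega
      · rw [if_neg h2, if_neg (by omega)]

-- the all-zero row of length w+2 (the border array's initial rows)
theorem pvZ2mem (w : Int) : ∀ x ∈ (PySem.List.pyRange 0 w 1).map (fun _ => (0 : Int)), x = 0 := by
  intro x hx
  simp only [List.mem_map] at hx
  obtain ⟨_, _, h⟩ := hx
  exact h.symm

-- characterization of the bordered array's entries
theorem pvAWB_entry (pa : List (List Int)) (w h : Int) :
    ∀ (r c : Int), 0 ≤ r → r < h + 2 → 0 ≤ c → c < w + 2 →
    PySem.List.pyGetD (PySem.List.pyGetD (pvZeroBorder pa (pvInit (w + 2) (h + 2) 0) w h) r []) c 0 =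
      pvExt pa w h (r - 1) (c - 1) := by
  intro r c hr0 hr hc0 hc
  have hw2 : (0 : Int) < w + 2 := by omega
  have hh2 : (0 : Int) < h + 2 := by omega
  set z2 : List Int := (PySem.List.pyRange 0 (w + 2) 1).map (fun _ => (0 : Int)) with hz2
  have hz2len : (z2.length : Int) = w + 2 := by
    simp [hz2, PySem.List.length_pyRange_one]
    omega
  have htemplen : (pvInit (w + 2) (h + 2) 0).length = (h + 2).toNat := by
    simp [pvInit, PySem.List.length_pyRange_one]
  have htemprow : ∀ (x : Int), 0 ≤ x → x < h + 2 →
      PySem.List.pyGetD (pvInit (w + 2) (h + 2) 0) x [] = z2 := by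
    intro x hx0 hx
    exact PySem.List.pyGetD_map_pyRange_of_nonneg _ (h + 2) x [] hx0 hx
  -- rewrite each row-update of ZeroBorder as a single set
  have hbody : ∀ (mm : List (List Int)) (i : Int), 0 ≤ i → i < h → mm.length = (h + 2).toNat →
      (PySem.List.pyRange 0 w 1).foldl (fun nw2 col =>
        PySem.List.pySetD nw2 (i + 1)
          (PySem.List.pySetD (PySem.List.pyGetD nw2 (i + 1) []) (col + 1)
            (PySem.List.pyGetD (PySem.List.pyGetD pa i []) col 0))) mm =
      PySem.List.pySetD mm (i + 1)
        ((PySem.List.pyRange 0 w 1).foldl (fun rr col =>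
            PySem.List.pySetD rr (col + 1) (PySem.List.pyGetD (PySem.List.pyGetD pa i []) col 0))
          (PySem.List.pyGetD mm (i + 1) [])) := by
    intro mm i hi0 hi hmm
    exact pvInner2Set (PySem.List.pyRange 0 w 1)
      (fun rr col => PySem.List.pySetD rr (col + 1) (PySem.List.pyGetD (PySem.List.pyGetD pa i []) col 0))
      mm (i + 1) (by omega) (by rw [hmm]; omega)
  have hmain := pvOuterFold
    (fun nw row => (PySem.List.pyRange 0 w 1).foldl (fun nw2 col =>
        PySem.List.pySetD nw2 (row + 1)
          (PySem.List.pySetD (PySem.List.pyGetD nw2 (row + 1) []) (col + 1)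
            (PySem.List.pyGetD (PySem.List.pyGetD pa row []) col 0))) nw)
    (fun row r0 => (PySem.List.pyRange 0 w 1).foldl (fun rr col =>
        PySem.List.pySetD rr (col + 1) (PySem.List.pyGetD (PySem.List.pyGetD pa row []) col 0)) r0)
    1 z2 (h + 2).toNat (h - 0).toNat 0 h (pvInit (w + 2) (h + 2) 0) rfl htemplen
    (by omega) (by omega) hbody
    (fun r hr1 hr2 => htemprow (r + 1) (by omega) (by omega))
  have hrow := hmain.2 r hr0 (by omega)
  unfold pvZeroBorder
  rw [hrow]
  by_cases hrin : 0 + 1 ≤ r ∧ r < h + 1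
  · rw [if_pos hrin]
    have hcol := pvSetFold 1 (fun col => PySem.List.pyGetD (PySem.List.pyGetD pa (r - 1) []) col 0) 0
      (w - 0).toNat 0 w z2 rfl (by omega) (by omega) c hc0 (by omega)
    rw [hcol]
    by_cases hcin : 0 + 1 ≤ c ∧ c < w + 1
    · rw [if_pos hcin]
      unfold pvExt
      rw [if_pos (by omega)]
    · rw [if_neg hcin]
      unfold pvExt
      rw [if_neg (by omega)]
      exact pvPG_const_zero z2 (pvZ2mem (w + 2)) c
  · rw [if_neg hrin]
    rw [htemprow r hr0 hr]
    unfold pvExt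
    rw [if_neg (by omega)]
    exact pvPG_const_zero z2 (pvZ2mem (w + 2)) c

-- CheckErosion on the bordered array computes the window predicate
theorem pvCheck_eq (pa : List (List Int)) (w h i j : Int)
    (hi1 : 1 ≤ i) (hi2 : i ≤ h - 2) (hj1 : 1 ≤ j) (hj2 : j ≤ w - 2) :
    pvCheckErosion (pvZeroBorder pa (pvInit (w + 2) (h + 2) 0) w h) i j =
      if pvZwin pa w h i j then 0 else 1 := by
  unfold pvCheckErosion
  set awb := pvZeroBorder pa (pvInit (w + 2) (h + 2) 0) w h with hawb
  have hinner : ∀ (x : Int) (acc : List Int),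
      (PySem.List.pyRange (-2) 3 1).foldl (fun acc2 y =>
        acc2 ++ [PySem.List.pyGetD (PySem.List.pyGetD awb ((i + x) + 1) []) ((j + y) + 1) 0]) acc =
      acc ++ (PySem.List.pyRange (-2) 3 1).map (fun y =>
        PySem.List.pyGetD (PySem.List.pyGetD awb ((i + x) + 1) []) ((j + y) + 1) 0) := by
    intro x acc
    exact PySem.List.foldl_append_singleton_eq_map _ _ _
  simp only [hinner]
  rw [PySem.List.foldl_append_eq_flatMap
    (fun x => (PySem.List.pyRange (-2) 3 1).map (fun y =>
      PySem.List.pyGetD (PySem.List.pyGetD awb ((i + x) + 1) []) ((j + y) + 1) 0)) _ []]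
  rw [List.nil_append]
  have hmem : (0 : Int) ∈ (PySem.List.pyRange (-2) 3 1).flatMap (fun x =>
      (PySem.List.pyRange (-2) 3 1).map (fun y =>
        PySem.List.pyGetD (PySem.List.pyGetD awb ((i + x) + 1) []) ((j + y) + 1) 0)) ↔
      pvZwin pa w h i j = true := by
    rw [List.mem_flatMap]
    unfold pvZwin
    rw [List.any_eq_true]
    constructor
    · rintro ⟨x, hx, hmap⟩
      rw [List.mem_map] at hmap
      obtain ⟨y, hy, hval⟩ := hmap
      refine ⟨x, hx, ?_⟩
      rw [List.any_eq_true]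
      refine ⟨y, hy, ?_⟩
      rw [beq_iff_eq]
      rw [PySem.List.mem_pyRange_one] at hx hy
      have hA := pvAWB_entry pa w h ((i + x) + 1) ((j + y) + 1) (by omega) (by omega) (by omega) (by omega)
      rw [show i + x + 1 - 1 = i + x by omega, show j + y + 1 - 1 = j + y by omega, ← hawb] at hA
      rw [← hA]
      exact hval
    · rintro ⟨x, hx, hany⟩
      rw [List.any_eq_true] at hany
      obtain ⟨y, hy, hval⟩ := hany
      rw [beq_iff_eq] at hval
      refine ⟨x, hx, ?_⟩
      rw [List.mem_map]
      refine ⟨y, hy, ?_⟩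
      rw [PySem.List.mem_pyRange_one] at hx hy
      have hA := pvAWB_entry pa w h ((i + x) + 1) ((j + y) + 1) (by omega) (by omega) (by omega) (by omega)
      rw [show i + x + 1 - 1 = i + x by omega, show j + y + 1 - 1 = j + y by omega, ← hawb] at hA
      rw [hA]
      exact hval
  by_cases hz : pvZwin pa w h i j = true
  · rw [if_pos (hmem.2 hz), hz, if_pos rfl]
  · rw [if_neg (fun hc => hz (hmem.1 hc))]
    rw [Bool.not_eq_true] at hz
    rw [hz]
    rfl

-- at or near the border the extended window always contains a 0
theorem pvZwin_border (pa : List (List Int)) (w h i j : Int)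
    (hb : i ≤ 0 ∨ h - 1 ≤ i ∨ j ≤ 0 ∨ w - 1 ≤ j) :
    pvZwin pa w h i j = true := by
  unfold pvZwin
  rw [List.any_eq_true]
  have h2 : (2 : Int) ∈ PySem.List.pyRange (-2) 3 1 := by
    rw [PySem.List.mem_pyRange_one]; omega
  have hm2 : (-2 : Int) ∈ PySem.List.pyRange (-2) 3 1 := by
    rw [PySem.List.mem_pyRange_one]; omega
  have h0 : (0 : Int) ∈ PySem.List.pyRange (-2) 3 1 := by
    rw [PySem.List.mem_pyRange_one]; omega
  rcases hb with hb | hb | hb | hb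
  · exact ⟨-2, hm2, by rw [List.any_eq_true]; exact ⟨0, h0, by rw [beq_iff_eq]; unfold pvExt; rw [if_neg (by omega)]⟩⟩
  · exact ⟨2, h2, by rw [List.any_eq_true]; exact ⟨0, h0, by rw [beq_iff_eq]; unfold pvExt; rw [if_neg (by omega)]⟩⟩
  · exact ⟨0, h0, by rw [List.any_eq_true]; exact ⟨-2, hm2, by rw [beq_iff_eq]; unfold pvExt; rw [if_neg (by omega)]⟩⟩
  · exact ⟨0, h0, by rw [List.any_eq_true]; exact ⟨2, h2, by rw [beq_iff_eq]; unfold pvExt; rw [if_neg (by omega)]⟩⟩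

-- ===== A reduces to the normal form =====
theorem pvA_eq (pa : List (List Int)) (w h : Int) :
    computeErosion8Nbh5x5FlatSE pa w h = pvGrid pa w h := by
  have hunfold : computeErosion8Nbh5x5FlatSE pa w h =
      (PySem.List.pyRange 1 (h - 1) 1).foldl (fun img i =>
        (PySem.List.pyRange 1 (w - 1) 1).foldl (fun img2 j =>
          PySem.List.pySetD img2 i
            (PySem.List.pySetD (PySem.List.pyGetD img2 i []) j
              (pvCheckErosion (pvZeroBorder pa (pvInit (w + 2) (h + 2) 0) w h) i j))) img)
        (pvInit w h 0) := rfl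
  rw [hunfold]
  set awb := pvZeroBorder pa (pvInit (w + 2) (h + 2) 0) w h with hawb
  set F : Int → Int → Int := fun i j => pvCheckErosion awb i j with hF
  set zw : List Int := (PySem.List.pyRange 0 w 1).map (fun _ => (0 : Int)) with hzw
  have hzwlen : (zw.length : Int) = w.toNat := by simp [hzw, PySem.List.length_pyRange_one]
  have himglen : (pvInit w h 0).length = h.toNat := by
    simp [pvInit, PySem.List.length_pyRange_one]
  have himgrow : ∀ (x : Int), 0 ≤ x → x < h →
      PySem.List.pyGetD (pvInit w h 0) x [] = zw := by
    intro x hx0 hx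
    exact PySem.List.pyGetD_map_pyRange_of_nonneg _ h x [] hx0 hx
  set R : Int → List Int → List Int := fun i r0 =>
    (PySem.List.pyRange 1 (w - 1) 1).foldl (fun rr j => PySem.List.pySetD rr j (F i j)) r0 with hR
  have hplain : ∀ i : Int, (fun (rr : List Int) (j : Int) => PySem.List.pySetD rr j (F i j)) =
      (fun rr j => PySem.List.pySetD rr (j + 0) (F i j)) := by
    intro i; funext rr j; rw [add_zero]
  have hRlen : ∀ (i : Int) (r0 : List Int), (R i r0).length = r0.length := by
    intro i r0
    rw [hR]
    exact pvSetFoldLen (fun j => j) (F i) _ r0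
  have hbody : ∀ (mm : List (List Int)) (i : Int), 1 ≤ i → i < h - 1 → mm.length = h.toNat →
      (PySem.List.pyRange 1 (w - 1) 1).foldl (fun img2 j =>
        PySem.List.pySetD img2 i
          (PySem.List.pySetD (PySem.List.pyGetD img2 i []) j (pvCheckErosion awb i j))) mm =
      PySem.List.pySetD mm i (R i (PySem.List.pyGetD mm i [])) := by
    intro mm i hi1 hi2 hmm
    exact pvInner2Set (PySem.List.pyRange 1 (w - 1) 1)
      (fun rr j => PySem.List.pySetD rr j (F i j)) mm i (by omega) (by rw [hmm]; omega)
  have hmain := pvOuterFold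
    (fun img i => (PySem.List.pyRange 1 (w - 1) 1).foldl (fun img2 j =>
        PySem.List.pySetD img2 i
          (PySem.List.pySetD (PySem.List.pyGetD img2 i []) j (pvCheckErosion awb i j))) img)
    R 0 zw h.toNat (h - 1 - 1).toNat 1 (h - 1) (pvInit w h 0) rfl himglen
    (by omega) (by omega)
    (by intro mm i hi1 hi2 hmm
        simp only [add_zero]
        exact hbody mm i hi1 hi2 hmm)
    (by intro r hr1 hr2
        simp only [add_zero]
        exact himgrow r (by omega) (by omega))
  apply List.ext_getElem
  · rw [hmain.1]
    simp [pvGrid, PySem.List.length_pyRange_one]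
  · intro k h1 h2
    rw [hmain.1] at h1
    have hkh : (k : Int) < h := by omega
    have hleft := hmain.2 (k : Int) (by omega) (by omega)
    simp only [add_zero, sub_zero] at hleft
    rw [PySem.List.pyGetD_natCast, List.getD_eq_getElem _ [] (by rw [hmain.1]; exact h1)] at hleft
    rw [hleft]
    -- right side entry
    have hgrid : (pvGrid pa w h)[k] =
        (PySem.List.pyRange 0 w 1).map (fun j => if pvZwin pa w h (k : Int) j then 0 else 1) := by
      unfold pvGrid
      rw [List.getElem_map, PySem.List.getElem_pyRange_one]
      simp only [zero_add]
    rw [hgrid]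
    by_cases hkin : 1 ≤ (k : Int) ∧ (k : Int) < h - 1
    · rw [if_pos hkin, hR]
      apply List.ext_getElem
      · rw [pvSetFoldLen (fun j => j) (F (k : Int)) _ zw]
        simp [hzw, PySem.List.length_pyRange_one]
      · intro m hm1 hm2
        have hm1' := hm1
        rw [pvSetFoldLen (fun j => j) (F (k : Int)) _ zw] at hm1'
        have hmw : (m : Int) < w := by
          rw [hzw] at hm1'
          simp [PySem.List.length_pyRange_one] at hm1'
          omega
        have hLm := pvSetFold 0 (F (k : Int)) 0 (w - 1 - 1).toNat 1 (w - 1) zw rfl (by omega)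
          (by omega) (m : Int) (by omega) (by omega)
        simp only [add_zero, sub_zero] at hLm
        rw [PySem.List.pyGetD_natCast, List.getD_eq_getElem _ 0 (by
          rw [pvSetFoldLen (fun j => j) (F (k : Int)) _ zw]
          exact hm1')] at hLm
        rw [hLm]
        rw [List.getElem_map, PySem.List.getElem_pyRange_one]
        simp only [zero_add]
        by_cases hmin : 1 ≤ (m : Int) ∧ (m : Int) < w - 1
        · rw [if_pos hmin]
          rw [hF]
          rw [hawb]
          exact pvCheck_eq pa w h (k : Int) (m : Int) (by omega) (by omega) (by omega) (by omega)
        · rw [if_neg hmin]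
          rw [pvZwin_border pa w h (k : Int) (m : Int) (by omega)]
          rw [if_pos rfl]
          rw [hzw]
          exact pvPG_const_zero _ (pvZ2mem w) (m : Int)
    · rw [if_neg hkin]
      rw [himgrow (k : Int) (by omega) hkh, hzw]
      refine List.map_congr_left ?_
      intro j hj
      rw [PySem.List.mem_pyRange_one] at hj
      rw [pvZwin_border pa w h (k : Int) j (by omega)]
      simp

-- ===== B reduces to the normal form =====
theorem pvAlt_eq (pa : List (List Int)) (w h : Int) :
    computeErosion8Nbh5x5FlatSE_alt pa w h = pvGrid pa w h := by
  have hunfold : computeErosion8Nbh5x5FlatSE_alt pa w h =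
      (PySem.List.pyRange 0 h 1).map (fun i =>
        (PySem.List.pyRange 0 w 1).map (fun j =>
          if (PySem.List.pyRange (-2) 3 1).any (fun d =>
                decide (i + d < 0) || decide (h ≤ i + d) ||
                (PySem.List.pyGetD (PySem.List.pyGetD (pvHPass pa w h) (i + d) []) j 0 == 0))
          then 0 else 1)) := rfl
  rw [hunfold]
  unfold pvGrid
  refine List.map_congr_left ?_
  intro i hi
  rw [PySem.List.mem_pyRange_one] at hi
  refine List.map_congr_left ?_
  intro j hj
  rw [PySem.List.mem_pyRange_one] at hj
  have hany : (PySem.List.pyRange (-2) 3 1).any (fun d =>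
        decide (i + d < 0) || decide (h ≤ i + d) ||
        (PySem.List.pyGetD (PySem.List.pyGetD (pvHPass pa w h) (i + d) []) j 0 == 0)) =
      pvZwin pa w h i j := by
    unfold pvZwin
    refine PySem.List.any_congr_mem ?_
    intro d _
    by_cases hrow : 0 ≤ i + d ∧ i + d < h
    · have hg1 : decide (i + d < 0) = false := by simp; omega
      have hg2 : decide (h ≤ i + d) = false := by simp; omega
      rw [hg1, hg2, Bool.false_or, Bool.false_or]
      have hp1 : PySem.List.pyGetD (pvHPass pa w h) (i + d) [] =
          (PySem.List.pyRange 0 w 1).map (fun jj =>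
            if (PySem.List.pyRange (-2) 3 1).any (fun e =>
                  decide (jj + e < 0) || decide (w ≤ jj + e) ||
                  (PySem.List.pyGetD (PySem.List.pyGetD pa (i + d) []) (jj + e) 0 == 0))
            then 0 else 1) := by
        unfold pvHPass
        exact PySem.List.pyGetD_map_pyRange_of_nonneg _ h (i + d) [] hrow.1 hrow.2
      rw [hp1]
      rw [PySem.List.pyGetD_map_pyRange_of_nonneg _ w j 0 hj.1 hj.2]
      have hflat : ∀ (c : Bool), ((if c then (0 : Int) else 1) == 0) = c := by
        intro c; cases c <;> rfl
      rw [hflat]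
      refine PySem.List.any_congr_mem ?_
      intro e _
      by_cases hcol : 0 ≤ j + e ∧ j + e < w
      · have hc1 : decide (j + e < 0) = false := by simp; omega
        have hc2 : decide (w ≤ j + e) = false := by simp; omega
        rw [hc1, hc2, Bool.false_or, Bool.false_or]
        unfold pvExt
        rw [if_pos (by omega)]
      · have hext : pvExt pa w h (i + d) (j + e) = 0 := by
          unfold pvExt
          rw [if_neg (by omega)]
        rw [hext]
        simp only [beq_self_eq_true]
        rcases (by omega : j + e < 0 ∨ w ≤ j + e) with hx | hx
        · simp [hx]
        · simp [hx]
    · have hext : pvExt pa w h (i + d) (j + 0) = 0 := by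
        unfold pvExt
        rw [if_neg (by omega)]
      have hRt : ((PySem.List.pyRange (-2) 3 1).any (fun e => pvExt pa w h (i + d) (j + e) == 0)) = true := by
        rw [List.any_eq_true]
        exact ⟨0, by rw [PySem.List.mem_pyRange_one]; omega, by rw [beq_iff_eq]; exact hext⟩
      rw [hRt]
      rcases (by omega : i + d < 0 ∨ h ≤ i + d) with hx | hx
      · simp [hx]
      · simp [hx]
  rw [hany]

-- ===== VERDICT (by name: the statement is the Claim_ definition above) =====
theorem computeErosion8Nbh5x5FlatSE_spec : Claim_equal_computeErosion8Nbh5x5FlatSE := by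
  intro pa w h _ _
  unfold Spec_computeErosion8Nbh5x5FlatSE
  rw [pvA_eq, pvAlt_eq]
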